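-- pv_equiv track=rewrite | github.com/ershudai/APMdd373and7881 | Functions7881.py | get_cook
-- ===== SOURCE A (Python) =====
-- def get_cook(cook):
--     i=1
--     lit=[13,9,2,10,6,12,1]
--     dic={}
--     for ck in cook:
--         for lt in lit:
--             if lt==i:
--                 dic[ck] = cook[ck]
--             continue
--         i=i+1
--     return dic
-- ===== SOURCE B (Python) =====
-- def get_cook(cook):
--     keys = list(cook)
--     result = {}
--     for p in (1, 2, 6, 9, 10, 12, 13):
--         if p - 1 < len(keys):
--             k = keys[p - 1]
--             result[k] = cook[k]
--     return result
-- ===== Notes on version B (the rewrite author's own statement) =====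
-- stated objective: alternative
-- what changed: Instead of scanning every key of the dict while testing its running 1-based position against the fixed position list (a 7-element inner loop per key), B loops once over the 7 target positions in ascending order and indexes directly into the key list, skipping positions past the end.
import Mathlib
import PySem

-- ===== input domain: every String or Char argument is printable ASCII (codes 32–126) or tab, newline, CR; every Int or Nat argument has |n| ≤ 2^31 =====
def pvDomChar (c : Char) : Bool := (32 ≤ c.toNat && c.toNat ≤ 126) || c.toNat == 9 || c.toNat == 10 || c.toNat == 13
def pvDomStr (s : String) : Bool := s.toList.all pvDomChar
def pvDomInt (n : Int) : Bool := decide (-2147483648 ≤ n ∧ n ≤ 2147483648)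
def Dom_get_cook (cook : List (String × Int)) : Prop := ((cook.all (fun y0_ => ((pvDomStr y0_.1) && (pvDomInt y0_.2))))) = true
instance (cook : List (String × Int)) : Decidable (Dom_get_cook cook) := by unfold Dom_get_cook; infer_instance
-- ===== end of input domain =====

-- B replaces A's per-key scan (with its 7-position counter test per key) by a single loop over the
-- fixed positions in ascending order, indexing directly into the key list.


-- ===== PORT A =====
-- i=1; lit=[13,9,2,10,6,12,1]; for ck in cook: for lt in lit: if lt==i: dic[ck]=cook[ck]; i=i+1
def get_cook (cook : List (String × Int)) : List (String × Int) :=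
  let lit : List Int := [13, 9, 2, 10, 6, 12, 1]
  let res := cook.foldl
    (fun (st : Int × PySem.Dict String Int) ck =>
      let dic := lit.foldl
        (fun d lt =>
          if lt = st.1 then d.insert ck.1 (PySem.Dict.getD (PySem.Dict.mk cook) ck.1 0) else d)
        st.2
      (st.1 + 1, dic))
    (1, PySem.Dict.empty)
  res.2.items

-- ===== PORT B =====
-- keys = list(cook); for p in (1,2,6,9,10,12,13): if p-1 < len(keys): k = keys[p-1]; result[k] = cook[k]
def get_cook_alt (cook : List (String × Int)) : List (String × Int) :=
  let keys := cook.map Prod.fst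
  let res := ([1, 2, 6, 9, 10, 12, 13] : List Nat).foldl
    (fun (r : PySem.Dict String Int) p =>
      if h : p - 1 < keys.length then
        let k := keys[p - 1]
        r.insert k (PySem.Dict.getD (PySem.Dict.mk cook) k 0)
      else r)
    PySem.Dict.empty
  res.items

-- ===== PRECONDITION & SPEC =====
def Spec_get_cook (cook : List (String × Int)) (out : List (String × Int)) : Prop := out = get_cook_alt cook
instance (cook : List (String × Int)) (out : List (String × Int)) : Decidable (Spec_get_cook cook out) := by unfold Spec_get_cook; infer_instance

-- ===== CLAIM (what is proved, stated in full; the proofs are below) =====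
def Claim_equal_get_cook : Prop := ∀ (cook : List (String × Int)), Dom_get_cook cook → Spec_get_cook cook (get_cook cook)

-- ===== LEMMAS AND PROOFS =====

-- the keys A's loop selects, scanning the key list with counter i
def pvSel : List String → Int → List String
  | [], _ => []
  | k :: ks, i =>
    if i ∈ ([13, 9, 2, 10, 6, 12, 1] : List Int) then k :: pvSel ks (i + 1)
    else pvSel ks (i + 1)

-- the keys B's loop selects: the key at each in-range fixed position, ascending
def pvSelB (ks : List String) : List String :=
  ([1, 2, 6, 9, 10, 12, 13] : List Nat).filterMap (fun p => ks[p - 1]?)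

-- A's inner loop over the literal position list inserts exactly when the counter is a member
theorem pvInner (i : Int) (d : PySem.Dict String Int) (k : String) (v : Int) :
    ([13, 9, 2, 10, 6, 12, 1] : List Int).foldl
      (fun d lt => if lt = i then d.insert k v else d) d
    = if i ∈ ([13, 9, 2, 10, 6, 12, 1] : List Int) then d.insert k v else d := by
  by_cases h1 : i = 13; · subst h1; simp
  by_cases h2 : i = 9; · subst h2; simp
  by_cases h3 : i = 2; · subst h3; simp
  by_cases h4 : i = 10; · subst h4; simp
  by_cases h5 : i = 6; · subst h5; simp
  by_cases h6 : i = 12; · subst h6; simp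
  by_cases h7 : i = 1; · subst h7; simp
  simp [List.foldl, eq_comm, h1, h2, h3, h4, h5, h6, h7]

-- A's outer fold, characterised as a fold of inserts over the selected keys
theorem pvAchar (cook : List (String × Int)) :
    ∀ (xs : List (String × Int)) (i : Int) (d : PySem.Dict String Int),
    (xs.foldl
      (fun (st : Int × PySem.Dict String Int) ck =>
        (st.1 + 1,
          ([13, 9, 2, 10, 6, 12, 1] : List Int).foldl
            (fun d lt =>
              if lt = st.1 then d.insert ck.1 (PySem.Dict.getD (PySem.Dict.mk cook) ck.1 0) else d)
            st.2))
      (i, d)).2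
    = (pvSel (xs.map Prod.fst) i).foldl
        (fun d k => d.insert k (PySem.Dict.getD (PySem.Dict.mk cook) k 0)) d := by
  intro xs
  induction xs with
  | nil => intro i d; simp [pvSel]
  | cons x xs ih =>
    intro i d
    rw [List.foldl_cons]
    simp only []
    rw [ih, pvInner]
    by_cases h : i ∈ ([13, 9, 2, 10, 6, 12, 1] : List Int)
    · rw [if_pos h]; simp [pvSel, h]
    · rw [if_neg h]; simp [pvSel, h]

-- B's fold, characterised the same way
theorem pvBchar (cook : List (String × Int)) :
    ∀ (ps : List Nat) (ks : List String) (r : PySem.Dict String Int),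
    ps.foldl
      (fun (r : PySem.Dict String Int) p =>
        if h : p - 1 < ks.length then
          r.insert ks[p - 1] (PySem.Dict.getD (PySem.Dict.mk cook) ks[p - 1] 0)
        else r) r
    = (ps.filterMap (fun p => ks[p - 1]?)).foldl
        (fun d k => d.insert k (PySem.Dict.getD (PySem.Dict.mk cook) k 0)) r := by
  intro ps
  induction ps with
  | nil => intro ks r; simp
  | cons p ps ih =>
    intro ks r
    simp only [List.foldl_cons, List.filterMap_cons]
    by_cases h : p - 1 < ks.length
    · rw [dif_pos h, List.getElem?_eq_getElem h]
      simp [ih]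
    · rw [dif_neg h, List.getElem?_eq_none (by omega)]
      simp [ih]

-- past position 13 A's scan selects nothing
theorem pvSel_high : ∀ (ks : List String) (i : Int), 13 < i → pvSel ks i = [] := by
  intro ks
  induction ks with
  | nil => intro i _; simp [pvSel]
  | cons k ks ih =>
    intro i hi
    have : i ∉ ([13, 9, 2, 10, 6, 12, 1] : List Int) := by
      simp only [List.mem_cons, List.not_mem_nil, or_false]; omega
    simp [pvSel, this, ih (i + 1) (by omega)]

-- the two selections coincide
theorem pvSel_eq (ks : List String) : pvSel ks 1 = pvSelB ks := by
  rcases ks with _ | ⟨k1, ks⟩; · simp [pvSel, pvSelB]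
  rcases ks with _ | ⟨k2, ks⟩; · simp [pvSel, pvSelB]
  rcases ks with _ | ⟨k3, ks⟩; · simp [pvSel, pvSelB]
  rcases ks with _ | ⟨k4, ks⟩; · simp [pvSel, pvSelB]
  rcases ks with _ | ⟨k5, ks⟩; · simp [pvSel, pvSelB]
  rcases ks with _ | ⟨k6, ks⟩; · simp [pvSel, pvSelB]
  rcases ks with _ | ⟨k7, ks⟩; · simp [pvSel, pvSelB]
  rcases ks with _ | ⟨k8, ks⟩; · simp [pvSel, pvSelB]
  rcases ks with _ | ⟨k9, ks⟩; · simp [pvSel, pvSelB]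
  rcases ks with _ | ⟨k10, ks⟩; · simp [pvSel, pvSelB]
  rcases ks with _ | ⟨k11, ks⟩; · simp [pvSel, pvSelB]
  rcases ks with _ | ⟨k12, ks⟩; · simp [pvSel, pvSelB]
  rcases ks with _ | ⟨k13, ks⟩; · simp [pvSel, pvSelB]
  simp [pvSel, pvSelB, pvSel_high ks 14 (by norm_num)]

-- ===== VERDICT (by name: the statement is the Claim_ definition above) =====
theorem get_cook_spec : Claim_equal_get_cook := by
  intro cook _
  show get_cook cook = get_cook_alt cook
  simp only [get_cook, get_cook_alt]
  rw [pvAchar cook cook 1 PySem.Dict.empty, pvBchar cook _ (cook.map Prod.fst) PySem.Dict.empty]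
  rw [pvSel_eq]
  rfl
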